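-- pv_equiv track=rewrite | github.com/reframe-hpc/reframe | cscs-checks/microbenchmarks/mpi/osu/osu_benchmarks.py | count_hops
-- ===== SOURCE A (Python) =====
-- def count_hops(u, v):
--     switches = {
--         's0': {'tsa-pp011', 'tsa-pp012', 'tsa-pp013', 'tsa-pp014'},
--         's1': {'tsa-pp015', 'tsa-pp016', 'tsa-pp017'},
--         's2': {'tsa-pp018', 'tsa-pp019', 'tsa-pp020'}
--     }
--
--     for group in switches.values():
--         if u in group and v in group:
--             return 1
--         elif u in group:
--             return 2
--         elif v in group:
--             return 2
--
--     # This should not happen; u, v must be in a node group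
--     assert 0
-- ===== SOURCE B (Python) =====
-- def count_hops(u, v):
--     switches = {
--         's0': ('tsa-pp011', 'tsa-pp012', 'tsa-pp013', 'tsa-pp014'),
--         's1': ('tsa-pp015', 'tsa-pp016', 'tsa-pp017'),
--         's2': ('tsa-pp018', 'tsa-pp019', 'tsa-pp020'),
--     }
--     index = {node: label for label, grp in switches.items() for node in grp}
--     gu = index.get(u)
--     gv = index.get(v)
--     if gu is not None and gu == gv:
--         return 1
--     if gu is not None or gv is not None:
--         return 2
--     # u, v must be in a node group
--     assert 0
-- ===== Notes on version B (the rewrite author's own statement) =====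
-- stated objective: simpler
-- what changed: Replaces the group-by-group membership loop with a precomputed reverse index (node -> switch label) and two lookups followed by a label comparison.
import Mathlib
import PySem

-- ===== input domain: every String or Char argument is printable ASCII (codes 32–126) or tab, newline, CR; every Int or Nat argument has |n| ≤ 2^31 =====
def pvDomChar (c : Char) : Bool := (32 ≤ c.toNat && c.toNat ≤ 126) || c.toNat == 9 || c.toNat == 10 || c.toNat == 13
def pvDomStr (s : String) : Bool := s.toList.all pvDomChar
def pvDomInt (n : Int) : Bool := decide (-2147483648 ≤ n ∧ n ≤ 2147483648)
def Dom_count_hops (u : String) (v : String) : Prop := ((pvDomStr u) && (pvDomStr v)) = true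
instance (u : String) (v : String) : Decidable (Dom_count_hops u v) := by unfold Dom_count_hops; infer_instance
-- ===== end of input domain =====

-- B replaces A's group-by-group membership loop with a precomputed reverse index
-- (node -> switch label) plus two lookups and a label comparison (objective: simpler).

-- ===== PORT A =====
def switchesA : PySem.Dict String (PySem.Set String) :=
  ((PySem.Dict.empty.insert "s0"
      (PySem.Set.ofList ["tsa-pp011", "tsa-pp012", "tsa-pp013", "tsa-pp014"])).insert "s1"
      (PySem.Set.ofList ["tsa-pp015", "tsa-pp016", "tsa-pp017"])).insert "s2"
      (PySem.Set.ofList ["tsa-pp018", "tsa-pp019", "tsa-pp020"])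

-- the 'for group in switches.values()' loop with its early returns; none = fell through to 'assert 0'
def loopA (u v : String) : List (PySem.Set String) → Option Int
  | [] => none
  | g :: rest =>
    if PySem.Set.contains g u && PySem.Set.contains g v then some 1
    else if PySem.Set.contains g u then some 2
    else if PySem.Set.contains g v then some 2
    else loopA u v rest

def count_hops (u : String) (v : String) : Int :=
  (loopA u v (PySem.Dict.values switchesA)).getD 0  -- none = AssertionError, excluded by Pre_

-- ===== PORT B =====
def switchesB : List (String × List String) :=
  [("s0", ["tsa-pp011", "tsa-pp012", "tsa-pp013", "tsa-pp014"]),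
   ("s1", ["tsa-pp015", "tsa-pp016", "tsa-pp017"]),
   ("s2", ["tsa-pp018", "tsa-pp019", "tsa-pp020"])]

-- the dict comprehension {node: label for label, grp in switches.items() for node in grp}
def indexB : PySem.Dict String String :=
  switchesB.foldl (fun d p => p.2.foldl (fun d node => d.insert node p.1) d) PySem.Dict.empty

def count_hops_alt (u : String) (v : String) : Int :=
  let gu := PySem.Dict.get? indexB u
  let gv := PySem.Dict.get? indexB v
  if gu.isSome && gu == gv then 1
  else if gu.isSome || gv.isSome then 2
  else 0  -- AssertionError in the Python, excluded by Pre_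

-- ===== PRECONDITION & SPEC =====
-- A (and B) raise AssertionError when neither node name is in any switch group; Pre_ excludes exactly those inputs.
def Pre_count_hops (u : String) (v : String) : Prop :=
  u ∈ ["tsa-pp011", "tsa-pp012", "tsa-pp013", "tsa-pp014", "tsa-pp015", "tsa-pp016",
       "tsa-pp017", "tsa-pp018", "tsa-pp019", "tsa-pp020"] ∨
  v ∈ ["tsa-pp011", "tsa-pp012", "tsa-pp013", "tsa-pp014", "tsa-pp015", "tsa-pp016",
       "tsa-pp017", "tsa-pp018", "tsa-pp019", "tsa-pp020"]
instance (u : String) (v : String) : Decidable (Pre_count_hops u v) := by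
  unfold Pre_count_hops; infer_instance

def pvWitness_count_hops : String × String := ("tsa-pp011", "tsa-pp015")

def Spec_count_hops (u : String) (v : String) (out : Int) : Prop := out = count_hops_alt u v
instance (u : String) (v : String) (out : Int) : Decidable (Spec_count_hops u v out) := by
  unfold Spec_count_hops; infer_instance

-- ===== CLAIM (what is proved, stated in full; the proofs are below) =====
def Claim_equal_count_hops : Prop :=
  ∀ (u : String) (v : String), Dom_count_hops u v → Pre_count_hops u v →
    Spec_count_hops u v (count_hops u v)

-- ===== LEMMAS AND PROOFS =====

-- B's reverse index looked up at any string, phrased by group membership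
theorem lookup_form (u : String) : PySem.Dict.get? indexB u =
    (if u ∈ (["tsa-pp011", "tsa-pp012", "tsa-pp013", "tsa-pp014"] : List String) then some "s0"
     else if u ∈ (["tsa-pp015", "tsa-pp016", "tsa-pp017"] : List String) then some "s1"
     else if u ∈ (["tsa-pp018", "tsa-pp019", "tsa-pp020"] : List String) then some "s2"
     else none) := by
  by_cases h1 : u = "tsa-pp011"; · subst h1; decide
  by_cases h2 : u = "tsa-pp012"; · subst h2; decide
  by_cases h3 : u = "tsa-pp013"; · subst h3; decide
  by_cases h4 : u = "tsa-pp014"; · subst h4; decide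
  by_cases h5 : u = "tsa-pp015"; · subst h5; decide
  by_cases h6 : u = "tsa-pp016"; · subst h6; decide
  by_cases h7 : u = "tsa-pp017"; · subst h7; decide
  by_cases h8 : u = "tsa-pp018"; · subst h8; decide
  by_cases h9 : u = "tsa-pp019"; · subst h9; decide
  by_cases h10 : u = "tsa-pp020"; · subst h10; decide
  simp [indexB, switchesB, PySem.Dict.get?, PySem.Dict.insert, PySem.Dict.empty,
        List.foldl, h1, h2, h3, h4, h5, h6, h7, h8, h9, h10]
  exact ⟨fun h => h1 h.symm, fun h => h2 h.symm, fun h => h3 h.symm, fun h => h4 h.symm,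
         fun h => h5 h.symm, fun h => h6 h.symm, fun h => h7 h.symm, fun h => h8 h.symm,
         fun h => h9 h.symm, fun h => h10 h.symm⟩

set_option maxHeartbeats 2000000 in
theorem count_hops_eq_alt (u v : String) (hpre : Pre_count_hops u v) :
    count_hops u v = count_hops_alt u v := by
  unfold Pre_count_hops at hpre
  have hv : PySem.Dict.values switchesA =
      [PySem.Set.ofList ["tsa-pp011", "tsa-pp012", "tsa-pp013", "tsa-pp014"],
       PySem.Set.ofList ["tsa-pp015", "tsa-pp016", "tsa-pp017"],
       PySem.Set.ofList ["tsa-pp018", "tsa-pp019", "tsa-pp020"]] := by decide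
  simp only [count_hops, count_hops_alt, lookup_form, hv, loopA]
  simp only [PySem.Set.contains_eq_listContains, List.contains_eq_mem, PySem.Set.mem_ofList] at *
  simp only [List.mem_cons, List.not_mem_nil, or_false] at *
  split_ifs <;> simp_all

-- ===== VERDICT (by name: the statement is the Claim_ definition above) =====
theorem count_hops_spec : Claim_equal_count_hops := by
  intro u v _ hpre
  unfold Spec_count_hops
  exact count_hops_eq_alt u v hpre
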